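-- pv_equiv track=rewrite | github.com/johnverghese/algos | heapsort.py | percolate_down
-- ===== SOURCE A (Python) =====
-- def percolate_down(a, i):
--     root_idx = i
--     while len(a) > 2*root_idx+1: #while at least one child
--         if a[root_idx] > a[2*root_idx+1]:
--             a[root_idx], a[2*root_idx+1] = a[2*root_idx+1], a[root_idx]
--             root_idx = 2*root_idx+1
--         elif len(a) > 2*root_idx+2: # has right child
--             if a[root_idx] > a[2*root_idx+2]:
--                 a[root_idx], a[2*root_idx+2] = a[2*root_idx+2], a[root_idx]
--                 root_idx = 2*root_idx+2
--             else: # two children, no need to swap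
--                 root_idx = len(a) # break
--         else: # no children, or only left but no need to swap
--             root_idx = len(a) # break
--
--     return a
-- ===== SOURCE B (Python) =====
-- def percolate_down(a, i):
--     # hole-based sift-down: compute the descent path once with the moving
--     # value held out, then shift child values up along the path in one pass
--     n = len(a)
--     if 2*i + 1 >= n:  # no left child: nothing to sift
--         return a
--     v = a[i]
--     path = [i]
--     r = i
--     while True:
--         left = 2*r + 1
--         if n > left and v > a[left]:
--             r = left
--         elif n > left + 1 and v > a[left + 1]:
--             r = left + 1
--         else:
--             break
--         path.append(r)
--     for k in range(len(path) - 1):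
--         a[path[k]] = a[path[k + 1]]
--     a[path[-1]] = v
--     return a
-- ===== Notes on version B (the rewrite author's own statement) =====
-- stated objective: alternative
-- what changed: Replaces the repeated pairwise-swap loop by a hole-based sift: one pass computes the descent path comparing the held-out moving value against child values, then a second pass shifts child values up along the path and drops the value at the end.
-- outside the precondition, e.g. on percolate_down([-2, 1], -1): A returns [-2, 1], B returns [1, -2]
import Mathlib
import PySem

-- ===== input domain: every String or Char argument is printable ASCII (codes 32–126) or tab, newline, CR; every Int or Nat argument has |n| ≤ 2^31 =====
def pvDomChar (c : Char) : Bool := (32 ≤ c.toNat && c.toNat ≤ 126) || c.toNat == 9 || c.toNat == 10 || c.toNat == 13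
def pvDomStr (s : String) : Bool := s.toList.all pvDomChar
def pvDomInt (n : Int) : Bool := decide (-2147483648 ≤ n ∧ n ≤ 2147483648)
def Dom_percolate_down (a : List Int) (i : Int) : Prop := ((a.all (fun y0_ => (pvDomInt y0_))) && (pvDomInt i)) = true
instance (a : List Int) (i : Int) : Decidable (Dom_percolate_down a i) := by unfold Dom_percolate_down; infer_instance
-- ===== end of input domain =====

-- B replaces A's repeated pairwise swaps by a hole-based sift (descent path first,
-- then one shifting pass); equal cost, different decomposition. Both A and B mutate
-- the list in place in Python; the equivalence proved here is about the returned value.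

-- ===== PORT A =====

-- Python's simultaneous swap a[i], a[j] = a[j], a[i] (indices in range under Pre_).
def pvSwap (a : List Int) (i j : Nat) : List Int :=
  (a.set i (a.getD j 0)).set j (a.getD i 0)

-- A's while loop, root_idx as the recursion argument; the fuel (first argument)
-- only makes the recursion structural: a.length steps always suffice, since the
-- root index strictly grows and the loop stops once it has no left child.
def pdLoop : Nat → List Int → Nat → List Int
  | 0, a, _ => a
  | fuel+1, a, r =>
    if a.length > 2*r+1 then
      if a.getD r 0 > a.getD (2*r+1) 0 then
        pdLoop fuel (pvSwap a r (2*r+1)) (2*r+1)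
      else if a.length > 2*r+2 then
        if a.getD r 0 > a.getD (2*r+2) 0 then
          pdLoop fuel (pvSwap a r (2*r+2)) (2*r+2)
        else a
      else a
    else a

def percolate_down (a : List Int) (i : Int) : List Int := pdLoop a.length a i.toNat

-- ===== PORT B =====

-- B's while loop: the descent path from r, comparing the held-out value v against
-- the untouched child values; fuel as above, a.length steps always suffice.
def pdPath : Nat → List Int → Nat → Int → Nat → List Nat
  | 0, _, _, _, r => [r]
  | fuel+1, a, n, v, r =>
    if n > 2*r+1 ∧ v > a.getD (2*r+1) 0 then
      r :: pdPath fuel a n v (2*r+1)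
    else if n > 2*r+2 ∧ v > a.getD (2*r+2) 0 then
      r :: pdPath fuel a n v (2*r+2)
    else [r]

-- B's for loop: a[path[k]] = a[path[k+1]] in order, then a[path[-1]] = v.
def pdShift (v : Int) : List Nat → List Int → List Int
  | [], acc => acc
  | [p], acc => acc.set p v
  | p :: q :: rest, acc => pdShift v (q :: rest) (acc.set p (acc.getD q 0))

def percolate_down_alt (a : List Int) (i : Int) : List Int :=
  if 2*i + 1 ≥ (a.length : Int) then a
  else pdShift (a.getD i.toNat 0) (pdPath a.length a a.length (a.getD i.toNat 0) i.toNat) a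

-- ===== PRECONDITION & SPEC =====
-- Pre_ excludes negative i, where Python indexing resolves through negative-index
-- wraparound: A raises IndexError on most such inputs, and where it returns, the
-- wrapped descent is an accident of the in-place swaps.
def Pre_percolate_down (_a : List Int) (i : Int) : Prop := 0 ≤ i
instance (a : List Int) (i : Int) : Decidable (Pre_percolate_down a i) := by unfold Pre_percolate_down; infer_instance
def pvWitness_percolate_down : List Int × Int := ([3, 1, 2], 0)

def Spec_percolate_down (a : List Int) (i : Int) (out : List Int) : Prop := out = percolate_down_alt a i
instance (a : List Int) (i : Int) (out : List Int) : Decidable (Spec_percolate_down a i out) := by unfold Spec_percolate_down; infer_instance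

-- ===== CLAIM (what is proved, stated in full; the proofs are below) =====
def Claim_equal_percolate_down : Prop := ∀ (a : List Int) (i : Int), Dom_percolate_down a i → Pre_percolate_down a i → Spec_percolate_down a i (percolate_down a i)

-- ===== LEMMAS AND PROOFS =====

theorem pvSwap_length (a : List Int) (i j : Nat) : (pvSwap a i j).length = a.length := by
  simp [pvSwap]

theorem set_getD_self (a : List Int) (r : Nat) : a.set r (a.getD r 0) = a := by
  induction a generalizing r with
  | nil => simp
  | cons x xs ih =>
      cases r with
      | zero => simp
      | succ n => simpa using ih n

theorem getD_set_ne (a : List Int) (i j : Nat) (x : Int) (h : j ≠ i) :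
    (a.set i x).getD j 0 = a.getD j 0 := by
  induction a generalizing i j with
  | nil => simp
  | cons y ys ih =>
      cases i <;> cases j <;> simp_all [List.getD]

theorem getD_set_self (a : List Int) (i : Nat) (x : Int) (h : i < a.length) :
    (a.set i x).getD i 0 = x := by
  induction a generalizing i with
  | nil => simp at h
  | cons y ys ih => cases i <;> simp_all [List.getD]

-- pdPath only looks at entries strictly above its root index.
theorem pdPath_congr (fuel : Nat) (n : Nat) (v : Int) (r : Nat) (a b : List Int)
    (hab : ∀ j, r < j → a.getD j 0 = b.getD j 0) :
    pdPath fuel a n v r = pdPath fuel b n v r := by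
  induction fuel generalizing r with
  | zero => rfl
  | succ fuel ih =>
      have e1 : a.getD (2*r+1) 0 = b.getD (2*r+1) 0 := hab _ (by omega)
      have e2 : a.getD (2*r+2) 0 = b.getD (2*r+2) 0 := hab _ (by omega)
      show (if n > 2*r+1 ∧ v > a.getD (2*r+1) 0 then _ else _) = _
      rw [e1, e2]
      show _ = (if n > 2*r+1 ∧ v > b.getD (2*r+1) 0 then _ else _)
      split_ifs with h1 h2
      · rw [ih (2*r+1) (fun j hj => hab j (by omega))]
      · rw [ih (2*r+2) (fun j hj => hab j (by omega))]
      · rfl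

-- A path with no left child in range is trivial.
theorem pdPath_stop (fuel : Nat) (a : List Int) (n : Nat) (v : Int) (r : Nat)
    (h : n ≤ 2*r+1) : pdPath fuel a n v r = [r] := by
  cases fuel with
  | zero => rfl
  | succ fuel =>
      show (if _ ∧ _ then _ else if _ ∧ _ then _ else _) = _
      rw [if_neg (by omega), if_neg (by omega)]

-- The path starts at its root: either it stops there or descends to a larger index.
theorem pdPath_cases (fuel : Nat) (a : List Int) (n : Nat) (v : Int) (r : Nat) :
    pdPath fuel a n v r = [r] ∨
    ∃ fuel' r', fuel = fuel' + 1 ∧ r < r' ∧ pdPath fuel a n v r = r :: pdPath fuel' a n v r' := by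
  cases fuel with
  | zero => exact Or.inl rfl
  | succ fuel =>
      by_cases h1 : n > 2*r+1 ∧ v > a.getD (2*r+1) 0
      · refine Or.inr ⟨fuel, 2*r+1, rfl, by omega, ?_⟩
        show (if _ ∧ _ then _ else _) = _
        rw [if_pos h1]
      · by_cases h2 : n > 2*r+2 ∧ v > a.getD (2*r+2) 0
        · refine Or.inr ⟨fuel, 2*r+2, rfl, by omega, ?_⟩
          show (if _ ∧ _ then _ else if _ ∧ _ then _ else _) = _
          rw [if_neg h1, if_pos h2]
        · refine Or.inl ?_
          show (if _ ∧ _ then _ else if _ ∧ _ then _ else _) = _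
          rw [if_neg h1, if_neg h2]

-- Pre-writing v at the head index of the path does not change the shift's result.
theorem pdShift_set_head (fuel : Nat) (a : List Int) (n : Nat) (v : Int) (r : Nat)
    (acc : List Int) :
    pdShift v (pdPath fuel a n v r) (acc.set r v) = pdShift v (pdPath fuel a n v r) acc := by
  rcases pdPath_cases fuel a n v r with h | ⟨fuel', r', _, hr', h⟩
  · rw [h]; simp [pdShift, List.set_set]
  · rw [h]
    rcases pdPath_cases fuel' a n v r' with h' | ⟨fuel'', r'', _, hr'', h'⟩ <;> rw [h']
    · show pdShift v [r'] ((acc.set r v).set r ((acc.set r v).getD r' 0)) = _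
      rw [List.set_set, getD_set_ne acc r r' v (by omega)]
      rfl
    · show pdShift v (r' :: pdPath fuel'' a n v r'') ((acc.set r v).set r ((acc.set r v).getD r' 0)) = _
      rw [List.set_set, getD_set_ne acc r r' v (by omega)]
      rfl

-- KEY: A's loop equals B's path-then-shift, given enough fuel on both sides.
theorem pdLoop_eq (fuel : Nat) (a : List Int) (r : Nat) (hf : a.length ≤ r + fuel) :
    pdLoop fuel a r = pdShift (a.getD r 0) (pdPath fuel a a.length (a.getD r 0) r) a := by
  induction fuel generalizing a r with
  | zero =>
      show a = pdShift (a.getD r 0) [r] a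
      show a = a.set r (a.getD r 0)
      rw [set_getD_self]
  | succ fuel ih =>
      show (if a.length > 2*r+1 then _ else _) = _
      split_ifs with h1 h2 h3 h4
      · -- swap with left child 2r+1
        have hlen : (pvSwap a r (2*r+1)).length = a.length := pvSwap_length ..
        have hv : (pvSwap a r (2*r+1)).getD (2*r+1) 0 = a.getD r 0 := by
          unfold pvSwap
          exact getD_set_self _ _ _ (by simpa using h1)
        rw [ih (pvSwap a r (2*r+1)) (2*r+1) (by omega), hlen, hv]
        rw [pdPath_congr fuel a.length (a.getD r 0) (2*r+1) (pvSwap a r (2*r+1)) a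
            (fun j hj => by
              unfold pvSwap
              rw [getD_set_ne _ _ _ _ (by omega), getD_set_ne _ _ _ _ (by omega)])]
        have hswap : pvSwap a r (2*r+1) = (a.set r (a.getD (2*r+1) 0)).set (2*r+1) (a.getD r 0) := rfl
        rw [hswap, pdShift_set_head]
        -- fold one step of pdPath and pdShift on the right-hand side
        conv_rhs =>
          rw [show pdPath (fuel+1) a a.length (a.getD r 0) r
                = r :: pdPath fuel a a.length (a.getD r 0) (2*r+1) from by
            show (if _ ∧ _ then _ else _) = _
            rw [if_pos ⟨h1, h2⟩]]
        rcases pdPath_cases fuel a a.length (a.getD r 0) (2*r+1) with h | ⟨f', r', _, hr', h⟩ <;>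
          rw [h] <;> rfl
      · -- swap with right child 2r+2
        have hlen : (pvSwap a r (2*r+2)).length = a.length := pvSwap_length ..
        have hv : (pvSwap a r (2*r+2)).getD (2*r+2) 0 = a.getD r 0 := by
          unfold pvSwap
          exact getD_set_self _ _ _ (by simpa using h3)
        rw [ih (pvSwap a r (2*r+2)) (2*r+2) (by omega), hlen, hv]
        rw [pdPath_congr fuel a.length (a.getD r 0) (2*r+2) (pvSwap a r (2*r+2)) a
            (fun j hj => by
              unfold pvSwap
              rw [getD_set_ne _ _ _ _ (by omega), getD_set_ne _ _ _ _ (by omega)])]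
        have hswap : pvSwap a r (2*r+2) = (a.set r (a.getD (2*r+2) 0)).set (2*r+2) (a.getD r 0) := rfl
        rw [hswap, pdShift_set_head]
        conv_rhs =>
          rw [show pdPath (fuel+1) a a.length (a.getD r 0) r
                = r :: pdPath fuel a a.length (a.getD r 0) (2*r+2) from by
            show (if _ ∧ _ then _ else if _ ∧ _ then _ else _) = _
            rw [if_neg (by omega), if_pos ⟨h3, h4⟩]]
        rcases pdPath_cases fuel a a.length (a.getD r 0) (2*r+2) with h | ⟨f', r', _, hr', h⟩ <;>
          rw [h] <;> rfl
      · -- two children, no swap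
        rw [show pdPath (fuel+1) a a.length (a.getD r 0) r = [r] from by
          show (if _ ∧ _ then _ else if _ ∧ _ then _ else _) = _
          rw [if_neg (by omega), if_neg (by omega)]]
        show a = a.set r (a.getD r 0)
        rw [set_getD_self]
      · -- only left child, no swap
        rw [show pdPath (fuel+1) a a.length (a.getD r 0) r = [r] from by
          show (if _ ∧ _ then _ else if _ ∧ _ then _ else _) = _
          rw [if_neg (by omega), if_neg (by omega)]]
        show a = a.set r (a.getD r 0)
        rw [set_getD_self]
      · -- no children
        rw [pdPath_stop fuel.succ a a.length (a.getD r 0) r (by omega)]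
        show a = a.set r (a.getD r 0)
        rw [set_getD_self]

-- ===== VERDICT (by name: the statement is the Claim_ definition above) =====
theorem percolate_down_spec : Claim_equal_percolate_down := by
  intro a i _hDom hPre
  unfold Spec_percolate_down percolate_down percolate_down_alt
  rw [pdLoop_eq a.length a i.toNat (by omega)]
  split_ifs with hg
  · have hPre' : (0:Int) ≤ i := hPre
    rw [pdPath_stop a.length a a.length (a.getD i.toNat 0) i.toNat (by omega)]
    show a.set i.toNat (a.getD i.toNat 0) = a
    rw [set_getD_self]
  · rfl
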